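-- pv_equiv track=rewrite | github.com/ArdesiholD/ardesi-prime | ardesi_prime.py | candidati_ardesi
-- ===== SOURCE A (Python) =====
-- from typing import List
--
-- ARDESI_RESIDUES = (1, 7, 11, 13, 17, 19, 23, 29)
--
-- def candidati_ardesi(n: int, k: int = 3) -> List[int]:
--     base = n - (n % 30)
--     out = []
--     for r in ARDESI_RESIDUES:
--         c = base + r
--         if c >= n:
--             out.append(c)
--             if len(out) >= k:
--                 break
--     return out
-- ===== SOURCE B (Python) =====
-- import bisect
-- from typing import List
--
-- ARDESI_RESIDUES = (1, 7, 11, 13, 17, 19, 23, 29)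
--
-- def candidati_ardesi(n: int, k: int = 3) -> List[int]:
--     if k <= 0:
--         return []
--     t = n % 30
--     base = n - t
--     i = bisect.bisect_left(ARDESI_RESIDUES, t)
--     return [base + r for r in ARDESI_RESIDUES[i:i + k]]
-- ===== Notes on version B (the rewrite author's own statement) =====
-- stated objective: idiomatic
-- what changed: Instead of scanning all residues and testing each candidate against n with an early break, B locates the first residue >= n % 30 by binary search (bisect_left, valid because ARDESI_RESIDUES is sorted) and returns a single slice of k residues shifted by base.
-- intended difference: For k <= 0 A still returns one candidate because its break test runs only after the first append, while B returns the empty list, the intended answer when at most k <= 0 candidates are requested. — e.g. on candidati_ardesi(0, 0): A returns [1], B returns []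
import Mathlib
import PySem

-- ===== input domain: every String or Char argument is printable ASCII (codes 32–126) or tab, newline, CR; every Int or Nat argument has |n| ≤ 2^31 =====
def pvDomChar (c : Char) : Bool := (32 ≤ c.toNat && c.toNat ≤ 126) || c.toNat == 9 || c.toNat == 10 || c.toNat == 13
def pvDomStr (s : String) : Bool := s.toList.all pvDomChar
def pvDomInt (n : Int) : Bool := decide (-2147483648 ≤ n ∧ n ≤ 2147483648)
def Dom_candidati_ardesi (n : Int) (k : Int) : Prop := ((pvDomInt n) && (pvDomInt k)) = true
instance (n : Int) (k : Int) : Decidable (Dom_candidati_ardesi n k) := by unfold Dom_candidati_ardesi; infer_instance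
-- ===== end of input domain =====

-- B replaces A's scan-and-test over the residue wheel by a bisect_left binary search plus one slice (more idiomatic);
-- for k ≤ 0 A still returns one candidate (break test runs after append) while B returns [], the intended value (D_ below).


-- ===== PORT A =====
def ardesiResidues : List Int := [1, 7, 11, 13, 17, 19, 23, 29]

-- the for-loop of A, with its early break once len(out) >= k
def candLoopA (n k base : Int) : List Int → List Int → List Int
  | [], out => out
  | r :: rs, out =>
    let c := base + r
    if c ≥ n then
      let out' := out ++ [c]
      if (out'.length : Int) ≥ k then out'
      else candLoopA n k base rs out'
    else candLoopA n k base rs out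

def candidati_ardesi (n : Int) (k : Int) : List Int :=
  let base := n - PySem.Int.mod n 30
  candLoopA n k base ardesiResidues []

-- ===== PORT B =====
def candidati_ardesi_alt (n : Int) (k : Int) : List Int :=
  if k ≤ 0 then []
  else
    let t := PySem.Int.mod n 30
    let base := n - t
    let i := PySem.List.bisectLeft ardesiResidues t
    (PySem.List.slice ardesiResidues (some (i : Int)) (some ((i : Int) + k))).map (fun r => base + r)

-- ===== PRECONDITION & SPEC =====
-- For k ≤ 0 A still returns one candidate because its break test runs only after the first append,
-- while B returns the empty list, the intended answer when at most k ≤ 0 candidates are requested.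
def D_candidati_ardesi (n : Int) (k : Int) : Prop := k ≤ 0
instance (n : Int) (k : Int) : Decidable (D_candidati_ardesi n k) := by unfold D_candidati_ardesi; infer_instance

def Spec_candidati_ardesi (n : Int) (k : Int) (out : List Int) : Prop := ¬ D_candidati_ardesi n k → out = candidati_ardesi_alt n k
instance (n : Int) (k : Int) (out : List Int) : Decidable (Spec_candidati_ardesi n k out) := by unfold Spec_candidati_ardesi; infer_instance

def pvDiffWitness_candidati_ardesi : Int × Int := (0, 0)
def pvDiffWitnessOut_candidati_ardesi : (List Int) × (List Int) := ([1], [])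

-- ===== CLAIM (what is proved, stated in full; the proofs are below) =====
def Claim_unchanged_candidati_ardesi : Prop := ∀ (n : Int) (k : Int), Dom_candidati_ardesi n k → Spec_candidati_ardesi n k (candidati_ardesi n k)
def Claim_changed_candidati_ardesi : Prop := Dom_candidati_ardesi (pvDiffWitness_candidati_ardesi.1) (pvDiffWitness_candidati_ardesi.2) ∧ D_candidati_ardesi (pvDiffWitness_candidati_ardesi.1) (pvDiffWitness_candidati_ardesi.2) ∧ candidati_ardesi (pvDiffWitness_candidati_ardesi.1) (pvDiffWitness_candidati_ardesi.2) = pvDiffWitnessOut_candidati_ardesi.1 ∧ candidati_ardesi_alt (pvDiffWitness_candidati_ardesi.1) (pvDiffWitness_candidati_ardesi.2) = pvDiffWitnessOut_candidati_ardesi.2 ∧ pvDiffWitnessOut_candidati_ardesi.1 ≠ pvDiffWitnessOut_candidati_ardesi.2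
def Claim_exact_candidati_ardesi : Prop := ∀ (n : Int) (k : Int), Dom_candidati_ardesi n k → D_candidati_ardesi n k → candidati_ardesi n k ≠ candidati_ardesi_alt n k

-- ===== LEMMAS AND PROOFS =====

-- A's loop collects, onto out, the first (k - |out|) residues r with base + r ≥ n, shifted by base.
lemma candLoopA_eq_take (n k t : Int) (rs : List Int) :
    ∀ out : List Int, (out.length : Int) < k →
      candLoopA n k (n - t) rs out =
        out ++ ((rs.filter (fun r => decide (t ≤ r))).take (k - out.length).toNat).map (fun r => n - t + r) := by
  induction rs with
  | nil => intro out _; simp [candLoopA]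
  | cons r rs ih =>
    intro out hout
    by_cases hc : n - t + r ≥ n
    · have htr : t ≤ r := by omega
      by_cases hk : ((out ++ [n - t + r]).length : Int) ≥ k
      · have h1 : (k - (out.length : Int)).toNat = 1 := by
          simp at hk; omega
        simp only [candLoopA, if_pos hc, if_pos hk]
        simp [htr, h1]
      · have hout' : ((out ++ [n - t + r]).length : Int) < k := by omega
        have h2 : (k - (out.length : Int)).toNat = (k - ((out ++ [n - t + r]).length : Int)).toNat + 1 := by
          simp; omega
        simp only [candLoopA, if_pos hc, if_neg hk]
        rw [ih _ hout']
        simp [htr, h2]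
    · have htr : ¬ (t ≤ r) := by omega
      simp only [candLoopA, if_neg hc]
      rw [ih _ hout]
      simp [htr]

-- B's bisect + drop agrees with filtering the sorted residue list.
lemma drop_bisect_eq_filter (t : Int) (h0 : 0 ≤ t) (h30 : t < 30) :
    ardesiResidues.drop (PySem.List.bisectLeft ardesiResidues t) =
      ardesiResidues.filter (fun r => decide (t ≤ r)) := by
  interval_cases t <;> decide

-- if the loop returns [], nothing was ever appended
lemma candLoopA_eq_nil (n k base : Int) (rs : List Int) :
    ∀ out : List Int, candLoopA n k base rs out = [] →
      out = [] ∧ ∀ r ∈ rs, ¬ (base + r ≥ n) := by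
  induction rs with
  | nil => intro out h; simpa [candLoopA] using h
  | cons r rs ih =>
    intro out h
    by_cases hc : base + r ≥ n
    · by_cases hk : ((out ++ [base + r]).length : Int) ≥ k
      · simp only [candLoopA, if_pos hc, if_pos hk] at h
        simp at h
      · simp only [candLoopA, if_pos hc, if_neg hk] at h
        have := (ih _ h).1
        simp at this
    · simp only [candLoopA, if_neg hc] at h
      obtain ⟨h1, h2⟩ := ih _ h
      refine ⟨h1, ?_⟩
      intro x hx
      rcases List.mem_cons.mp hx with hx | hx
      · simpa [hx] using hc
      · exact h2 x hx

-- ===== VERDICT (by name: the statement is the Claim_ definition above) =====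
theorem candidati_ardesi_spec : Claim_unchanged_candidati_ardesi := by
  intro n k _ hD
  unfold D_candidati_ardesi at hD
  have hk : ¬ k ≤ 0 := hD
  have hk1 : 0 < k := by omega
  set t := PySem.Int.mod n 30 with ht
  have h0 : 0 ≤ t := PySem.Int.mod_nonneg n (by norm_num)
  have h30 : t < 30 := PySem.Int.mod_lt n (by norm_num)
  unfold candidati_ardesi
  simp only [candidati_ardesi_alt, if_neg hk]
  rw [← ht]
  rw [candLoopA_eq_take n k t ardesiResidues [] (by simpa using hk1)]
  have hi : (0 : Int) ≤ (PySem.List.bisectLeft ardesiResidues t : Int) := by positivity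
  rw [PySem.List.slice_toNat ardesiResidues hi (by omega)]
  have htn : ((PySem.List.bisectLeft ardesiResidues t : Int) + k).toNat
      - ((PySem.List.bisectLeft ardesiResidues t : Int)).toNat = k.toNat := by omega
  rw [htn]
  rw [Int.toNat_natCast, drop_bisect_eq_filter t h0 h30]
  simp

theorem candidati_ardesi_changed : Claim_changed_candidati_ardesi := by
  unfold Claim_changed_candidati_ardesi; decide

theorem candidati_ardesi_tight : Claim_exact_candidati_ardesi := by
  intro n k _ hD h
  unfold D_candidati_ardesi at hD
  unfold candidati_ardesi candidati_ardesi_alt at h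
  rw [if_pos hD] at h
  obtain ⟨-, hall⟩ := candLoopA_eq_nil n k _ ardesiResidues [] h
  have h29 : (29 : Int) ∈ ardesiResidues := by decide
  have := hall 29 h29
  have h30 : PySem.Int.mod n 30 < 30 := PySem.Int.mod_lt n (by norm_num)
  omega
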